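-- pv_equiv track=rewrite | github.com/hansinla/Principles_of_Computing | Week 3/tests.py | gen_all_sequences
-- ===== SOURCE A (Python) =====
-- def gen_all_sequences(outcomes, length):
--     """
--     Iterative function that enumerates the set of all sequences of
--     outcomes of given length
--     """
--     ans = set([()])
--     for dummy_idx in range(length):
--         temp = set()
--         for seq in ans:
--             for item in outcomes:
--                 new_seq = list(seq)
--                 new_seq.append(item)
--                 temp.add(tuple(new_seq))
--         ans = temp
--     return ans
-- ===== SOURCE B (Python) =====
-- def gen_all_sequences(outcomes, length):
--     """
--     Recursive function that enumerates the set of all sequences of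
--     outcomes of given length
--     """
--     if length <= 0:
--         return set([()])
--     return {seq + (item,)
--             for seq in gen_all_sequences(outcomes, length - 1)
--             for item in outcomes}
-- ===== Notes on version B (the rewrite author's own statement) =====
-- stated objective: simpler
-- what changed: Replaced the iterative accumulator loop over range(length) by a direct recursion on length with a set comprehension extending each shorter sequence.
import Mathlib
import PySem

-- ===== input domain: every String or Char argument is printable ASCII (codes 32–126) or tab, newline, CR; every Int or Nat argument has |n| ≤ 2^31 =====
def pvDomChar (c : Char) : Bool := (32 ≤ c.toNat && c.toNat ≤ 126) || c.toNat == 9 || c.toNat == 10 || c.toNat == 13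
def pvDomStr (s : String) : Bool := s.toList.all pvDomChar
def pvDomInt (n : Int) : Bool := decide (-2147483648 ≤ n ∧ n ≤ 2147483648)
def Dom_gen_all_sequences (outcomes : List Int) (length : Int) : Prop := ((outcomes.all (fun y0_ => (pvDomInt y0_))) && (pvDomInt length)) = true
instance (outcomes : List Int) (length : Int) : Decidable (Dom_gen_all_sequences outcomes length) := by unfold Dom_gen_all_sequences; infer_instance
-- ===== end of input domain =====

-- B replaces A's iterative accumulator loop over range(length) by a direct recursion on
-- length with a set comprehension (objective: simpler; same cost).

-- ===== PORT A =====
-- A iterates `for seq in ans` over a Python set, but only to build another set, so the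
-- result is independent of that (unmodelled) hash order; the set is PySem.Set.
def gen_all_sequences (outcomes : List Int) (length : Int) : List (List Int) :=
  (PySem.List.pyRange 0 length 1).foldl
    (fun ans _dummy_idx =>
      ans.foldl (fun temp seq =>
          outcomes.foldl (fun temp item =>
              PySem.Set.add temp (seq ++ [item])) temp)
        PySem.Set.empty)
    (PySem.Set.ofList [[]])

-- ===== PORT B =====
-- the set comprehension is set(<generated list>) = PySem.Set.ofList of the flatMap/map list
def gen_all_sequences_alt (outcomes : List Int) (length : Int) : List (List Int) :=
  if length ≤ 0 then [[]]
  else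
    PySem.Set.ofList
      ((gen_all_sequences_alt outcomes (length - 1)).flatMap
        (fun seq => outcomes.map (fun item => seq ++ [item])))
termination_by length.toNat
decreasing_by omega

-- ===== PRECONDITION & SPEC =====
def Spec_gen_all_sequences (outcomes : List Int) (length : Int) (out : List (List Int)) : Prop := out = gen_all_sequences_alt outcomes length
instance (outcomes : List Int) (length : Int) (out : List (List Int)) : Decidable (Spec_gen_all_sequences outcomes length out) := by unfold Spec_gen_all_sequences; infer_instance

-- ===== CLAIM (what is proved, stated in full; the proofs are below) =====
def Claim_equal_gen_all_sequences : Prop := ∀ (outcomes : List Int) (length : Int), Dom_gen_all_sequences outcomes length → Spec_gen_all_sequences outcomes length (gen_all_sequences outcomes length)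

-- ===== LEMMAS AND PROOFS =====

-- A's inner double loop over a set equals folding Set.add over the comprehension's list
lemma gas_step_eq (outcomes : List Int) (l acc : List (List Int)) :
    l.foldl (fun temp seq =>
        outcomes.foldl (fun temp item => PySem.Set.add temp (seq ++ [item])) temp) acc
    = (l.flatMap (fun seq => outcomes.map (fun item => seq ++ [item]))).foldl
        PySem.Set.add acc := by
  induction l generalizing acc with
  | nil => rfl
  | cons s l ih =>
    simp only [List.foldl_cons, List.flatMap_cons, List.foldl_append, ih, List.foldl_map]

lemma gas_eq_nat (outcomes : List Int) (n : Nat) :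
    gen_all_sequences outcomes (n : Int) = gen_all_sequences_alt outcomes (n : Int) := by
  induction n with
  | zero =>
    simp only [Nat.cast_zero]
    rw [gen_all_sequences_alt]
    simp only [le_refl, if_true]
    unfold gen_all_sequences
    rw [PySem.List.pyRange_one_eq_nil (le_refl 0)]
    rfl
  | succ n ih =>
    unfold gen_all_sequences
    rw [show ((n + 1 : Nat) : Int) = (n : Int) + 1 by push_cast; ring,
        PySem.List.pyRange_one_succ_right (by positivity)]
    rw [List.foldl_append]
    unfold gen_all_sequences at ih
    rw [ih]
    rw [show gen_all_sequences_alt outcomes ((n : Int) + 1)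
        = PySem.Set.ofList
            ((gen_all_sequences_alt outcomes ((n : Int) + 1 - 1)).flatMap
              (fun seq => outcomes.map (fun item => seq ++ [item]))) by
      rw [gen_all_sequences_alt]; simp]
    simp only [List.foldl_cons, List.foldl_nil, add_sub_cancel_right]
    rw [gas_step_eq]
    rfl

-- ===== VERDICT (by name: the statement is the Claim_ definition above) =====
theorem gen_all_sequences_spec : Claim_equal_gen_all_sequences := by
  intro outcomes length _
  unfold Spec_gen_all_sequences
  rcases (by omega : length ≤ 0 ∨ 0 < length) with h | h
  · rw [gen_all_sequences_alt]
    simp only [if_pos h]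
    unfold gen_all_sequences
    rw [PySem.List.pyRange_one_eq_nil h]
    rfl
  · have : length = (length.toNat : Int) := by omega
    rw [this]
    exact gas_eq_nat outcomes length.toNat
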